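-- pv_equiv track=rewrite | github.com/Sumedha494/DSA-Questions | check_subsequence.py | findAllSubsequences
-- ===== SOURCE A (Python) =====
-- def findAllSubsequences(t, s):
--     """
--     Find all possible ways s can be a subsequence of t
--     """
--     def backtrack(t_idx, s_idx, path):
--         if s_idx == len(s):
--             result.append(path[:])
--             return
--
--         if t_idx == len(t):
--             return
--
--         for i in range(t_idx, len(t)):
--             if t[i] == s[s_idx]:
--                 path.append((i, t[i]))
--                 backtrack(i + 1, s_idx + 1, path)
--                 path.pop()
--
--     result = []
--     backtrack(0, 0, [])
--     return result
-- ===== SOURCE B (Python) =====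
-- def findAllSubsequences(t, s):
--     """
--     Find all possible ways s can be a subsequence of t
--     """
--     partials = [[]]
--     for c in s:
--         partials = [p + [(i, ch)]
--                     for p in partials
--                     for i, ch in enumerate(t)
--                     if ch == c and i >= (p[-1][0] + 1 if p else 0)]
--     return partials
-- ===== Notes on version B (the rewrite author's own statement) =====
-- stated objective: alternative
-- what changed: Replaced A's recursive backtracking DFS (which extends one path at a time, undoing choices with append/pop) by an iterative frontier construction that processes s one character per round, extending every partial index-path by each later matching position of t.
import Mathlib
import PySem

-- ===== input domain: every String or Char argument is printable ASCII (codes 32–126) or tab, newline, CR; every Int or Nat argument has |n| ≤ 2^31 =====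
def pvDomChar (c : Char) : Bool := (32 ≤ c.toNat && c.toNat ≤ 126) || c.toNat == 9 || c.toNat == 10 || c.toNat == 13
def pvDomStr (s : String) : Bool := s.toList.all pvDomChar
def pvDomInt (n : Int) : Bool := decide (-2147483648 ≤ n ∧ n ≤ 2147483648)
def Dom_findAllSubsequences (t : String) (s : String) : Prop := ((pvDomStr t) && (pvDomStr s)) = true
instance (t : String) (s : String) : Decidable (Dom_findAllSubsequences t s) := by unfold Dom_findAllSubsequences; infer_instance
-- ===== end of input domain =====

-- B replaces A's recursive backtracker by an iterative frontier that extends all partial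
-- index-paths one character of s at a time (objective: alternative decomposition, same output).

-- ===== PORT A =====
-- literal port of A's inner 'backtrack': recursion on the remaining suffix of s
-- (s_idx ↔ the suffix s[s_idx:]), t_idx and path as in the Python.
def pvBacktrack (tl : List Char) (path : List (Int × String)) (tIdx : Int) :
    List Char → List (List (Int × String))
  | [] => [path]
  | c :: cs =>
    if tIdx = (tl.length : Int) then []
    else
      (PySem.List.pyRange tIdx (tl.length : Int)).foldl
        (fun acc i =>
          if PySem.List.pyGetD tl i ' ' = c then
            acc ++ pvBacktrack tl (path ++ [(i, String.ofList [PySem.List.pyGetD tl i ' '])]) (i + 1) cs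
          else acc) []

def findAllSubsequences (t : String) (s : String) : List (List (Int × String)) :=
  pvBacktrack t.toList [] 0 s.toList

-- ===== PORT B =====
-- start index for extending a partial: p[-1][0] + 1 if p else 0
def pvStart (p : List (Int × String)) : Int :=
  match p.getLast? with
  | some e => e.1 + 1
  | none => 0

-- one layer: extend every partial by every later occurrence of c in t
def pvStep (tl : List Char) (partials : List (List (Int × String))) (c : Char) :
    List (List (Int × String)) :=
  partials.flatMap (fun p =>
    (PySem.List.enumerate tl 0).flatMap
      (fun ic => if ic.2 = c ∧ pvStart p ≤ ic.1 then [p ++ [(ic.1, String.ofList [ic.2])]] else []))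

def findAllSubsequences_alt (t : String) (s : String) : List (List (Int × String)) :=
  s.toList.foldl (pvStep t.toList) [[]]

-- ===== PRECONDITION & SPEC =====
def Spec_findAllSubsequences (t : String) (s : String) (out : List (List (Int × String))) : Prop := out = findAllSubsequences_alt t s
instance (t : String) (s : String) (out : List (List (Int × String))) : Decidable (Spec_findAllSubsequences t s out) := by unfold Spec_findAllSubsequences; infer_instance

-- ===== CLAIM (what is proved, stated in full; the proofs are below) =====
def Claim_equal_findAllSubsequences : Prop := ∀ (t : String) (s : String), Dom_findAllSubsequences t s → Spec_findAllSubsequences t s (findAllSubsequences t s)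

-- ===== LEMMAS AND PROOFS =====

-- common intermediate: all increasing index-paths matching the suffix cs using indices ≥ lo,
-- in the (shared) lexicographic order
def pvChains (tl : List Char) (lo : Int) : List Char → List (List (Int × String))
  | [] => [[]]
  | c :: cs =>
    (PySem.List.enumerate tl 0).flatMap
      (fun ic => if ic.2 = c ∧ lo ≤ ic.1 then
          (pvChains tl (ic.1 + 1) cs).map (fun r => (ic.1, String.ofList [ic.2]) :: r)
        else [])

theorem pv_mem_enum_bounds {α : Type} (ic : Int × α) :
    ∀ (tl : List α) (a : Int), ic ∈ PySem.List.enumerate tl a → a ≤ ic.1 ∧ ic.1 < a + tl.length := by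
  intro tl
  induction tl with
  | nil => intro a h; simp [PySem.List.enumerate] at h
  | cons x xs ih =>
    intro a h
    rw [PySem.List.enumerate_cons, List.mem_cons] at h
    rcases h with h | h
    · subst h; simp
    · have := ih (a + 1) h
      simp only [List.length_cons]
      push_cast
      omega

theorem pv_foldl_if {α β : Type} (p : α → Prop) [DecidablePred p] (g : α → List β)
    (l : List α) (acc : List β) :
    l.foldl (fun acc x => if p x then acc ++ g x else acc) acc
      = acc ++ l.flatMap (fun x => if p x then g x else []) := by
  have h : (fun (acc : List β) x => if p x then acc ++ g x else acc)
      = (fun acc x => acc ++ (if p x then g x else [])) := by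
    funext acc x; split <;> simp
  rw [h, PySem.List.foldl_append_eq_flatMap]

-- range(t_idx, len(t)) paired with t[i] is the enumerate of the suffix t[t_idx:]
theorem pv_range_enum (tl : List Char) :
    ∀ (n : Nat) (a : Int), 0 ≤ a → n = tl.length - a.toNat →
    (PySem.List.pyRange a (tl.length : Int)).map (fun j => (j, PySem.List.pyGetD tl j ' '))
      = PySem.List.enumerate (tl.drop a.toNat) a := by
  intro n
  induction n with
  | zero =>
    intro a ha hn
    have hb : (tl.length : Int) ≤ a := by omega
    rw [PySem.List.pyRange_one_eq_nil hb, List.drop_eq_nil_of_le (by omega)]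
    simp [PySem.List.enumerate]
  | succ n ih =>
    intro a ha hn
    have hlt : a < (tl.length : Int) := by omega
    have hnat : a.toNat < tl.length := by omega
    rw [PySem.List.pyRange_one_cons hlt, List.map_cons,
        PySem.List.pyGetD_eq_getElem tl ' ' ha hlt,
        List.drop_eq_getElem_cons hnat, PySem.List.enumerate_cons]
    have h1 : (a + 1).toNat = a.toNat + 1 := by omega
    rw [ih (a + 1) (by omega) (by omega), h1]

-- filtering enumerate(t) by lo ≤ i is the enumerate of the suffix t[lo:]
theorem pv_enum_filter {β : Type} (g : Int × Char → List β) :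
    ∀ (tl : List Char) (a lo : Int), a ≤ lo →
    (PySem.List.enumerate tl a).flatMap (fun ic => if lo ≤ ic.1 then g ic else [])
      = (PySem.List.enumerate (tl.drop (lo - a).toNat) lo).flatMap g := by
  intro tl
  induction tl with
  | nil => intro a lo _; simp [PySem.List.enumerate]
  | cons x xs ih =>
    intro a lo hal
    rw [PySem.List.enumerate_cons, List.flatMap_cons]
    by_cases h : lo ≤ a
    · have hla : lo = a := le_antisymm h hal
      subst hla
      rw [show (lo - lo).toNat = 0 from by omega, List.drop_zero,
          PySem.List.enumerate_cons, List.flatMap_cons,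
          if_pos (show lo ≤ ((lo, x) : Int × Char).1 from le_refl lo)]
      congr 1
      apply List.flatMap_congr
      intro ic hic
      have := pv_mem_enum_bounds ic xs (lo + 1) hic
      rw [if_pos (by omega)]
    · rw [if_neg (show ¬ lo ≤ ((a, x) : Int × Char).1 from h), List.nil_append,
          ih (a + 1) lo (by omega),
          show (lo - a).toNat = (lo - (a + 1)).toNat + 1 from by omega,
          List.drop_succ_cons]

-- A's backtracker computes the chains, prefixed by the accumulated path
theorem pv_bt_chains (tl : List Char) :
    ∀ (cs : List Char) (tIdx : Int) (path : List (Int × String)), 0 ≤ tIdx →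
    pvBacktrack tl path tIdx cs = (pvChains tl tIdx cs).map (fun r => path ++ r) := by
  intro cs
  induction cs with
  | nil => intro tIdx path _; simp [pvBacktrack, pvChains]
  | cons c cs ih =>
    intro tIdx path ht
    rw [pvBacktrack, pvChains]
    by_cases hend : tIdx = (tl.length : Int)
    · rw [if_pos hend]
      symm
      rw [List.map_eq_nil_iff, List.flatMap_eq_nil_iff]
      intro ic hic
      have := pv_mem_enum_bounds ic tl 0 hic
      rw [if_neg]
      rintro ⟨-, hge⟩
      omega
    · rw [if_neg hend]
      rw [pv_foldl_if (fun i => PySem.List.pyGetD tl i ' ' = c)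
            (fun i => pvBacktrack tl (path ++ [(i, String.ofList [PySem.List.pyGetD tl i ' '])]) (i + 1) cs)]
      rw [List.nil_append]
      have hmap := pv_range_enum tl (tl.length - tIdx.toNat) tIdx ht rfl
      calc (PySem.List.pyRange tIdx (tl.length : Int)).flatMap
              (fun i => if PySem.List.pyGetD tl i ' ' = c then
                  pvBacktrack tl (path ++ [(i, String.ofList [PySem.List.pyGetD tl i ' '])]) (i + 1) cs
                else [])
          = ((PySem.List.pyRange tIdx (tl.length : Int)).map
                (fun j => (j, PySem.List.pyGetD tl j ' '))).flatMap
              (fun ic => if ic.2 = c then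
                  pvBacktrack tl (path ++ [(ic.1, String.ofList [ic.2])]) (ic.1 + 1) cs
                else []) := by
            rw [List.flatMap_map]
        _ = (PySem.List.enumerate (tl.drop tIdx.toNat) tIdx).flatMap
              (fun ic => if ic.2 = c then
                  pvBacktrack tl (path ++ [(ic.1, String.ofList [ic.2])]) (ic.1 + 1) cs
                else []) := by rw [hmap]
        _ = (PySem.List.enumerate tl 0).flatMap
              (fun ic => if tIdx ≤ ic.1 then
                  (if ic.2 = c then
                    pvBacktrack tl (path ++ [(ic.1, String.ofList [ic.2])]) (ic.1 + 1) cs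
                  else [])
                else []) := by
            rw [pv_enum_filter (fun ic => if ic.2 = c then
                  pvBacktrack tl (path ++ [(ic.1, String.ofList [ic.2])]) (ic.1 + 1) cs
                else []) tl 0 tIdx ht,
              show (tIdx - 0).toNat = tIdx.toNat from by omega]
        _ = (PySem.List.enumerate tl 0).flatMap
              (fun ic => (if ic.2 = c ∧ tIdx ≤ ic.1 then
                  (pvChains tl (ic.1 + 1) cs).map (fun r => (ic.1, String.ofList [ic.2]) :: r)
                else []).map (fun r => path ++ r)) := by
            apply List.flatMap_congr
            intro ic hic
            have hb := pv_mem_enum_bounds ic tl 0 hic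
            by_cases h1 : tIdx ≤ ic.1
            · by_cases h2 : ic.2 = c
              · rw [if_pos h1, if_pos h2, if_pos ⟨h2, h1⟩,
                    ih (ic.1 + 1) (path ++ [(ic.1, String.ofList [ic.2])]) (by omega),
                    List.map_map]
                apply List.map_congr_left
                intro r _
                simp
              · rw [if_pos h1, if_neg h2, if_neg (fun hc => h2 hc.1)]
                simp
            · rw [if_neg h1, if_neg (fun hc => h1 hc.2)]
              simp
        _ = ((PySem.List.enumerate tl 0).flatMap
              (fun ic => if ic.2 = c ∧ tIdx ≤ ic.1 then
                  (pvChains tl (ic.1 + 1) cs).map (fun r => (ic.1, String.ofList [ic.2]) :: r)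
                else [])).map (fun r => path ++ r) := by
            rw [List.map_flatMap]

-- the extension start of p ++ [(i, ch)] is i + 1
theorem pv_start_concat (p : List (Int × String)) (e : Int × String) :
    pvStart (p ++ [e]) = e.1 + 1 := by
  simp [pvStart]

-- B's frontier fold computes the chains of each partial, prefixed by it
theorem pv_fold_chains (tl : List Char) :
    ∀ (cs : List Char) (P : List (List (Int × String))),
    cs.foldl (pvStep tl) P = P.flatMap (fun p => (pvChains tl (pvStart p) cs).map (fun r => p ++ r)) := by
  intro cs
  induction cs with
  | nil => intro P; simp [pvChains]
  | cons c cs ih =>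
    intro P
    rw [List.foldl_cons, ih, pvStep, List.flatMap_assoc]
    apply List.flatMap_congr
    intro p _
    rw [List.flatMap_assoc, pvChains, List.map_flatMap]
    apply List.flatMap_congr
    intro ic _
    by_cases h : ic.2 = c ∧ pvStart p ≤ ic.1
    · rw [if_pos h, if_pos h, List.flatMap_cons, List.flatMap_nil, List.append_nil,
          pv_start_concat, List.map_map]
      apply List.map_congr_left
      intro r _
      simp
    · rw [if_neg h, if_neg h, List.flatMap_nil, List.map_nil]

-- ===== VERDICT (by name: the statement is the Claim_ definition above) =====
theorem findAllSubsequences_spec : Claim_equal_findAllSubsequences := by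
  intro t s _
  unfold Spec_findAllSubsequences findAllSubsequences findAllSubsequences_alt
  rw [pv_bt_chains t.toList s.toList 0 [] le_rfl, pv_fold_chains]
  simp [pvStart]
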